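-- pv_equiv track=rewrite | github.com/SeoYoungDeok/Coding_Test | 프로그래머스/2/17679. ［1차］ 프렌즈4블록/［1차］ 프렌즈4블록.py | solution
-- ===== SOURCE A (Python) =====
-- import copy
--
-- def check(m, n, board):
--     x = 0
--     y = 0
--     result = 0
--     temp = copy.deepcopy(board)
--     for i in range(m-1):
--         for j in range(n-1):
--             if board[i][j] == board[i+1][j] and board[i+1][j] == board[i][j+1] and board[i][j+1] == board[i+1][j+1]:
--                 if temp[i][j] != 0:
--                     temp[i][j] = 0
--                     result += 1
--                 if temp[i+1][j] != 0:
--                     temp[i+1][j] = 0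
--                     result += 1
--                 if temp[i][j+1] != 0:
--                     temp[i][j+1] = 0
--                     result += 1
--                 if temp[i+1][j+1] != 0:
--                     temp[i+1][j+1] = 0
--                     result += 1
--     board = temp
--     return result, board
--
-- def move(m, n, board):
--     result = [[0 for i in range(n)] for j in range(m)]
--
--     for col in range(n):
--         temp = list()
--         for row in range(m-1, -1, -1):
--             if board[row][col] != 0:
--                 temp.append(board[row][col])
--         for i in range(len(temp)):
--             result[m-1-i][col] = temp[i]
--
--     return result
--
-- def solution(m, n, board):
--     answer = 0
--     board = [list(data) for data in board]
--
--     while True: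
--         cnt, board = check(m, n, board)
--
--         if cnt == 0:
--             break
--         else:
--             answer += cnt
--
--         board = move(m, n, board)
--     return answer
-- ===== SOURCE B (Python) =====
-- def solution(m, n, board):
--     # Column-stack representation: each column is the list of its cells bottom-up.
--     # Gravity is implicit (removing marked cells lets the rest settle automatically),
--     # so there is no sentinel value and no separate gravity pass.
--     if m < 2 or n < 2:
--         return 0  # no 2x2 block fits
--     cols = [[board[i][j] for i in range(m - 1, -1, -1)] for j in range(n)]
--     answer = 0
--     while True:
--         hit = set()
--         for j in range(n - 1):
--             left, right = cols[j], cols[j + 1]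
--             for k in range(min(len(left), len(right)) - 1):
--                 if left[k] == left[k + 1] == right[k] == right[k + 1]:
--                     hit.update([(j, k), (j, k + 1), (j + 1, k), (j + 1, k + 1)])
--         if not hit:
--             return answer
--         answer += len(hit)
--         cols = [[ch for k, ch in enumerate(col) if (j, k) not in hit]
--                 for j, col in enumerate(cols)]
-- ===== Notes on version B (the rewrite author's own statement) =====
-- stated objective: alternative
-- what changed: B stores the board as column stacks (each column a bottom-up list of its remaining cells) so gravity disappears entirely: detection scans adjacent column pairs at matching heights, removal filters the marked heights out of each stack and the rest settles by construction, whereas A keeps an m-by-n grid with 0-sentinels, a deepcopy-based per-cell counting pass and an explicit gravity pass rebuilding the matrix.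
-- outside the precondition, e.g. on solution(2, 3, ['ab', 'cd']): A returns 0, B raises IndexError
import Mathlib
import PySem

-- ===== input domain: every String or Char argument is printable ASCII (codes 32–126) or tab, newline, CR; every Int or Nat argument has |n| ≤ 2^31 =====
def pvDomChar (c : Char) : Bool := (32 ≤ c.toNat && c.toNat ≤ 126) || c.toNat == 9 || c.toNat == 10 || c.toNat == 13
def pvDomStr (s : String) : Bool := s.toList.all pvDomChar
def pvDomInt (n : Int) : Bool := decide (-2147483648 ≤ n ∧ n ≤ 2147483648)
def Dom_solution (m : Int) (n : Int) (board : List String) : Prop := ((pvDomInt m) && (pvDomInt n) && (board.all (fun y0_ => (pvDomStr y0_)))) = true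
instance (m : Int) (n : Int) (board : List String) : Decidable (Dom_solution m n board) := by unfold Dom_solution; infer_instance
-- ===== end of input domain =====

-- B replaces A's sentinel grid entirely by column stacks (each column the bottom-up list of its
-- remaining cells): gravity disappears (removing marked heights lets the rest settle by construction)
-- and detection scans adjacent column pairs at matching heights; alternative decomposition, same
-- asymptotic cost. Equivalence is about the RETURN value (both Pythons leave their arguments intact).

-- a board cell in A: `some c` is the character c, `none` is Python's cleared sentinel 0
abbrev PvGrid := List (List (Option Char))

-- shared index primitives (Python g[i][j] read and g[i][j] = v write; all indices used are ≥ 0,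
-- out-of-range accesses are Python IndexErrors excluded by Pre_)
def pvCell (g : PvGrid) (i j : Int) : Option Char :=
  PySem.List.pyGetD (PySem.List.pyGetD g i []) j none

def pvSetCell (g : PvGrid) (i j : Int) (v : Option Char) : PvGrid :=
  PySem.List.pySetD g i (PySem.List.pySetD (PySem.List.pyGetD g i []) j v)

-- ===== PORT A =====
-- `if temp[i][j] != 0: temp[i][j] = 0; result += 1` on the state (result, temp)
def pvClearCellA (st : Int × PvGrid) (i j : Int) : Int × PvGrid :=
  if pvCell st.2 i j ≠ none then (st.1 + 1, pvSetCell st.2 i j none) else st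

def pvCheckA (m n : Int) (b : PvGrid) : Int × PvGrid :=
  (PySem.List.pyRange 0 (m-1) 1).foldl (fun st i =>
    (PySem.List.pyRange 0 (n-1) 1).foldl (fun st j =>
      if pvCell b i j = pvCell b (i+1) j ∧ pvCell b (i+1) j = pvCell b i (j+1) ∧
         pvCell b i (j+1) = pvCell b (i+1) (j+1) then
        pvClearCellA (pvClearCellA (pvClearCellA (pvClearCellA st i j) (i+1) j) i (j+1)) (i+1) (j+1)
      else st) st) (0, b)

def pvMoveA (m n : Int) (b : PvGrid) : PvGrid :=
  let result : PvGrid :=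
    (PySem.List.pyRange 0 m 1).map (fun _ => (PySem.List.pyRange 0 n 1).map (fun _ => (none : Option Char)))
  (PySem.List.pyRange 0 n 1).foldl (fun result col =>
    let temp := (PySem.List.pyRange (m-1) (-1) (-1)).foldl (fun temp row =>
      if pvCell b row col ≠ none then temp ++ [pvCell b row col] else temp) ([] : List (Option Char))
    (PySem.List.pyRange 0 (PySem.List.len temp) 1).foldl (fun result i =>
      pvSetCell result (m-1-i) col (PySem.List.pyGetD temp i none)) result) result

-- `while True:` as fuel recursion; one productive round clears ≥ 1 cell, so (total cells)+1 rounds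
-- always suffice and the fuel guard is never the reason the loop stops.
def pvLoopA (m n : Int) : Nat → Int → PvGrid → Int
  | 0, answer, _ => answer
  | fuel+1, answer, board =>
    let r := pvCheckA m n board
    if r.1 = 0 then answer else pvLoopA m n fuel (answer + r.1) (pvMoveA m n r.2)

def solution (m : Int) (n : Int) (board : List String) : Int :=
  pvLoopA m n (board.foldl (fun a s => a + s.toList.length) 0 + 1) 0
    (board.map (fun s => s.toList.map some))

-- ===== PORT B =====
-- cols[j] / col[k] (Python raises out of range; the default is only reachable outside Pre_)
def pvColAt (cols : List (List Char)) (j : Int) : List Char := PySem.List.pyGetD cols j []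

-- `cols = [[board[i][j] for i in range(m-1, -1, -1)] for j in range(n)]`
def pvColsInit (m n : Int) (board : List String) : List (List Char) :=
  (PySem.List.pyRange 0 n 1).map (fun j =>
    (PySem.List.pyRange (m-1) (-1) (-1)).map (fun i =>
      PySem.List.pyGetD (PySem.List.pyGetD board i "").toList j ' '))

def pvHitB (n : Int) (cols : List (List Char)) : PySem.Set (Int × Int) :=
  (PySem.List.pyRange 0 (n-1) 1).foldl (fun H j =>
    let left := pvColAt cols j
    let right := pvColAt cols (j+1)
    (PySem.List.pyRange 0 (min (PySem.List.len left) (PySem.List.len right) - 1) 1).foldl (fun H k =>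
      if PySem.List.pyGetD left k ' ' = PySem.List.pyGetD left (k+1) ' ' ∧
         PySem.List.pyGetD left (k+1) ' ' = PySem.List.pyGetD right k ' ' ∧
         PySem.List.pyGetD right k ' ' = PySem.List.pyGetD right (k+1) ' ' then
        PySem.Set.update H [(j, k), (j, k+1), (j+1, k), (j+1, k+1)]
      else H) H) PySem.Set.empty

-- `cols = [[ch for k, ch in enumerate(col) if (j, k) not in hit] for j, col in enumerate(cols)]`
def pvDropB (hit : PySem.Set (Int × Int)) (cols : List (List Char)) : List (List Char) :=
  (PySem.List.enumerate cols).map (fun jc =>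
    (PySem.List.enumerate jc.2).filterMap (fun kc =>
      if (jc.1, kc.1) ∈ hit then none else some kc.2))

-- `while True:` as fuel recursion, same sufficient fuel as A's port
def pvLoopB (n : Int) : Nat → Int → List (List Char) → Int
  | 0, answer, _ => answer
  | fuel+1, answer, cols =>
    let H := pvHitB n cols
    if H = [] then answer
    else pvLoopB n fuel (answer + PySem.Set.len H) (pvDropB H cols)

def solution_alt (m : Int) (n : Int) (board : List String) : Int :=
  if m < 2 ∨ n < 2 then 0  -- no 2x2 block fits
  else pvLoopB n (board.foldl (fun a s => a + s.toList.length) 0 + 1) 0 (pvColsInit m n board)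

-- ===== PRECONDITION & SPEC =====
-- Pre_ excludes malformed boards (fewer than m rows, or a row among the first m shorter than n, while
-- m, n ≥ 2): on such boards A in general raises IndexError, and on some of them (when no comparison
-- happens to reach the missing cells) A's returning at all is a data-dependent accident.
def Pre_solution (m : Int) (n : Int) (board : List String) : Prop :=
  2 ≤ m → 2 ≤ n → (m ≤ (board.length : Int) ∧ ∀ s ∈ board.take m.toNat, n ≤ (s.toList.length : Int))
instance (m : Int) (n : Int) (board : List String) : Decidable (Pre_solution m n board) := by
  unfold Pre_solution; infer_instance
def pvWitness_solution : Int × Int × List String := (4, 5, ["CCBDE", "AAADE", "AAABF", "CCBBF"])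

def Spec_solution (m : Int) (n : Int) (board : List String) (out : Int) : Prop := out = solution_alt m n board
instance (m : Int) (n : Int) (board : List String) (out : Int) : Decidable (Spec_solution m n board out) := by unfold Spec_solution; infer_instance

-- ===== CLAIM (what is proved, stated in full; the proofs are below) =====
def Claim_equal_solution : Prop := ∀ (m : Int) (n : Int) (board : List String), Dom_solution m n board → Pre_solution m n board → Spec_solution m n board (solution m n board)

-- ===== LEMMAS AND PROOFS =====

-- `zeroOn b R` = b with every in-range cell whose (row, col) is in R set to the sentinel
def zeroOn (b : PvGrid) (R : List (Int × Int)) : PvGrid :=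
  b.mapIdx (fun i row => row.mapIdx (fun j v => if ((i : Int), (j : Int)) ∈ R then none else v))

-- Nat-level views of the shared index primitives (all indices in both programs are ≥ 0)
def cellN (g : PvGrid) (i j : Nat) : Option Char := (g.getD i []).getD j none

theorem pvCell_nonneg (g : PvGrid) {i j : Int} (hi : 0 ≤ i) (hj : 0 ≤ j) :
    pvCell g i j = cellN g i.toNat j.toNat := by
  unfold pvCell cellN
  rw [PySem.List.pyGetD_of_nonneg _ _ hi, PySem.List.pyGetD_of_nonneg _ _ hj]

theorem pvSetCell_nonneg (g : PvGrid) {i j : Int} (v : Option Char) (hi : 0 ≤ i) (hj : 0 ≤ j) :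
    pvSetCell g i j v = g.set i.toNat ((g.getD i.toNat []).set j.toNat v) := by
  unfold pvSetCell
  rw [PySem.List.pyGetD_of_nonneg _ _ hi, PySem.List.pySetD_of_nonneg _ _ hj,
      PySem.List.pySetD_of_nonneg _ _ hi]

theorem zeroOn_nil (b : PvGrid) : zeroOn b [] = b := by
  unfold zeroOn
  simp only [List.not_mem_nil, if_false]
  apply List.ext_getElem (by simp)
  intro r h1 h2
  rw [List.getElem_mapIdx]
  apply List.ext_getElem (by simp)
  intro q q1 q2
  simp [List.getElem_mapIdx]

theorem zeroOn_congr (b : PvGrid) {R R' : List (Int × Int)}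
    (h : ∀ p, p ∈ R ↔ p ∈ R') : zeroOn b R = zeroOn b R' := by
  unfold zeroOn
  refine List.mapIdx_eq_mapIdx_iff.mpr (fun i hi => ?_)
  refine List.mapIdx_eq_mapIdx_iff.mpr (fun j hj => ?_)
  by_cases hm : ((i : Int), (j : Int)) ∈ R
  · rw [if_pos hm, if_pos ((h _).mp hm)]
  · rw [if_neg hm, if_neg (fun hx => hm ((h _).mpr hx))]

theorem length_zeroOn (b : PvGrid) (R : List (Int × Int)) : (zeroOn b R).length = b.length := by
  simp [zeroOn]

theorem getElem_zeroOn (b : PvGrid) (R : List (Int × Int)) (r : Nat) (h : r < (zeroOn b R).length) :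
    (zeroOn b R)[r] = (b[r]'(by simpa [length_zeroOn] using h)).mapIdx
      (fun j v => if ((r : Int), (j : Int)) ∈ R then none else v) := by
  simp [zeroOn, List.getElem_mapIdx]

theorem cellN_zeroOn (b : PvGrid) (R : List (Int × Int)) (a c : Nat) :
    cellN (zeroOn b R) a c = if ((a : Int), (c : Int)) ∈ R then none else cellN b a c := by
  unfold cellN
  by_cases ha : a < b.length
  · have hz : a < (zeroOn b R).length := by simpa [length_zeroOn] using ha
    rw [List.getD_eq_getElem _ _ hz, getElem_zeroOn b R a hz, List.getD_eq_getElem _ _ ha]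
    by_cases hc : c < (b[a]'ha).length
    · rw [List.getD_eq_getElem _ _ (by simpa using hc), List.getD_eq_getElem _ _ hc,
          List.getElem_mapIdx]
    · rw [List.getD_eq_default _ _ (by simpa using Nat.le_of_not_lt hc),
          List.getD_eq_default _ _ (Nat.le_of_not_lt hc), ite_self]
  · have h1 : (zeroOn b R).getD a [] = [] :=
      List.getD_eq_default _ _ (by simpa [length_zeroOn] using Nat.le_of_not_lt ha)
    have h2 : b.getD a [] = [] := List.getD_eq_default _ _ (Nat.le_of_not_lt ha)
    rw [h1, h2]
    simp [ite_self]

theorem ite_mem_cons_ne {p q : Int × Int} (h : p ≠ q) (R : List (Int × Int)) (x y : Option Char) :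
    (if p ∈ q :: R then x else y) = (if p ∈ R then x else y) := by
  simp [List.mem_cons, h]

theorem setN_zeroOn (b : PvGrid) (R : List (Int × Int)) (a c : Nat) :
    (zeroOn b R).set a (((zeroOn b R).getD a []).set c none)
      = zeroOn b (((a : Int), (c : Int)) :: R) := by
  apply List.ext_getElem (by simp [length_zeroOn])
  intro r h1 h2
  rw [List.getElem_set, getElem_zeroOn b _ r h2]
  by_cases har : a = r
  · subst har
    have ha : a < b.length := by simpa [length_zeroOn] using h2
    have hz : a < (zeroOn b R).length := by simpa [length_zeroOn] using ha
    rw [if_pos rfl, List.getD_eq_getElem _ _ hz, getElem_zeroOn b R a hz]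
    apply List.ext_getElem (by simp)
    intro q q1 q2
    rw [List.getElem_set, List.getElem_mapIdx, List.getElem_mapIdx]
    by_cases hcq : c = q
    · subst hcq
      rw [if_pos rfl, if_pos List.mem_cons_self]
    · rw [if_neg hcq, ite_mem_cons_ne (by simp; omega) R]
  · rw [if_neg har, getElem_zeroOn b R r (by simpa [length_zeroOn] using h2)]
    refine List.mapIdx_eq_mapIdx_iff.mpr (fun q hq => ?_)
    rw [ite_mem_cons_ne (by simp; omega) R]

theorem pvCell_zeroOn (b : PvGrid) (R : List (Int × Int)) {i j : Int}
    (hi : 0 ≤ i) (hj : 0 ≤ j) :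
    pvCell (zeroOn b R) i j = if (i, j) ∈ R then none else pvCell b i j := by
  rw [pvCell_nonneg _ hi hj, pvCell_nonneg _ hi hj, cellN_zeroOn,
      Int.toNat_of_nonneg hi, Int.toNat_of_nonneg hj]

theorem pvSetCell_zeroOn (b : PvGrid) (R : List (Int × Int)) {i j : Int}
    (hi : 0 ≤ i) (hj : 0 ≤ j) :
    pvSetCell (zeroOn b R) i j none = zeroOn b ((i, j) :: R) := by
  rw [pvSetCell_nonneg _ _ hi hj, setN_zeroOn, Int.toNat_of_nonneg hi, Int.toNat_of_nonneg hj]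

theorem set_add_mem (R : PySem.Set (Int × Int)) (p : Int × Int) (h : p ∈ R) :
    PySem.Set.add R p = R := by
  simp [PySem.Set.add, PySem.Set.contains]
  exact h

theorem set_add_not_mem (R : PySem.Set (Int × Int)) (p : Int × Int) (h : ¬ p ∈ R) :
    PySem.Set.add R p = R ++ [p] := by
  simp [PySem.Set.add, PySem.Set.contains]
  intro hc
  exact absurd hc h

-- one Python `if temp[..] != 0` block on a non-cleared cell = one Set.add
theorem pvClearCellA_eq_add (b : PvGrid) (R : PySem.Set (Int × Int)) (i j : Int)
    (hi : 0 ≤ i) (hj : 0 ≤ j) (hv : pvCell b i j ≠ none) :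
    pvClearCellA ((R.length : Int), zeroOn b R) i j
      = (((PySem.Set.add R (i, j)).length : Int), zeroOn b (PySem.Set.add R (i, j))) := by
  unfold pvClearCellA
  by_cases hm : (i, j) ∈ R
  · rw [set_add_mem R _ hm]
    simp [pvCell_zeroOn b R hi hj, hm]
  · rw [set_add_not_mem R _ hm]
    simp only [pvCell_zeroOn b R hi hj, if_neg hm]
    rw [if_pos hv]
    refine Prod.ext (by simp) ?_
    show pvSetCell (zeroOn b R) i j none = zeroOn b (R ++ [(i, j)])
    rw [pvSetCell_zeroOn b R hi hj]
    exact zeroOn_congr b (fun p => by simp [List.mem_cons, List.mem_append]; tauto)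

theorem pvClearCellA_none (b : PvGrid) (R : PySem.Set (Int × Int)) (i j : Int)
    (hi : 0 ≤ i) (hj : 0 ≤ j) (hv : pvCell b i j = none) :
    pvClearCellA ((R.length : Int), zeroOn b R) i j = ((R.length : Int), zeroOn b R) := by
  unfold pvClearCellA
  simp [pvCell_zeroOn b R hi hj, hv, ite_self]

-- the scanned (i, j) pairs of A, and A's scan as a fold over them
def pvPairs (m n : Int) : List (Int × Int) :=
  (PySem.List.pyRange 0 (m-1) 1).flatMap (fun i => (PySem.List.pyRange 0 (n-1) 1).map (fun j => (i, j)))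

def pvStepA (b : PvGrid) (st : Int × PvGrid) (p : Int × Int) : Int × PvGrid :=
  if pvCell b p.1 p.2 = pvCell b (p.1+1) p.2 ∧ pvCell b (p.1+1) p.2 = pvCell b p.1 (p.2+1) ∧
     pvCell b p.1 (p.2+1) = pvCell b (p.1+1) (p.2+1) then
    pvClearCellA (pvClearCellA (pvClearCellA (pvClearCellA st p.1 p.2) (p.1+1) p.2) p.1 (p.2+1)) (p.1+1) (p.2+1)
  else st

-- A's freshly-counted cells of one scan, as a set of grid coordinates (proof-side value)
def matchA (b : PvGrid) (i j : Int) : Prop :=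
  pvCell b i j ≠ none ∧ pvCell b i j = pvCell b (i+1) j ∧
  pvCell b (i+1) j = pvCell b i (j+1) ∧ pvCell b i (j+1) = pvCell b (i+1) (j+1)

def blkA (p : Int × Int) : List (Int × Int) := [(p.1, p.2), (p.1+1, p.2), (p.1, p.2+1), (p.1+1, p.2+1)]

def specStep (b : PvGrid) (R : PySem.Set (Int × Int)) (p : Int × Int) : PySem.Set (Int × Int) :=
  if pvCell b p.1 p.2 ≠ none ∧ pvCell b p.1 p.2 = pvCell b (p.1+1) p.2 ∧
     pvCell b (p.1+1) p.2 = pvCell b p.1 (p.2+1) ∧ pvCell b p.1 (p.2+1) = pvCell b (p.1+1) (p.2+1) then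
    PySem.Set.update R (blkA p)
  else R

def specDetect (m n : Int) (b : PvGrid) : PySem.Set (Int × Int) :=
  (pvPairs m n).foldl (specStep b) []

theorem pvCheckA_eq_foldl (m n : Int) (b : PvGrid) :
    pvCheckA m n b = (pvPairs m n).foldl (pvStepA b) (0, b) := by
  unfold pvCheckA pvPairs
  rw [List.foldl_flatMap]
  simp only [List.foldl_map]
  rfl

theorem pvPairs_nonneg (m n : Int) : ∀ p ∈ pvPairs m n, 0 ≤ p.1 ∧ 0 ≤ p.2 := by
  intro p hp
  unfold pvPairs at hp
  simp only [List.mem_flatMap, List.mem_map] at hp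
  obtain ⟨i, hi, j, hj, rfl⟩ := hp
  rw [PySem.List.mem_pyRange_one] at hi hj
  exact ⟨hi.1, hj.1⟩

theorem mem_pvPairs (m n : Int) (p : Int × Int) :
    p ∈ pvPairs m n ↔ 0 ≤ p.1 ∧ p.1 < m-1 ∧ 0 ≤ p.2 ∧ p.2 < n-1 := by
  unfold pvPairs
  obtain ⟨i, j⟩ := p
  simp only [List.mem_flatMap, List.mem_map, PySem.List.mem_pyRange_one, Prod.mk.injEq]
  constructor
  · rintro ⟨a, ha, b, hb, rfl, rfl⟩
    exact ⟨ha.1, ha.2, hb.1, hb.2⟩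
  · rintro ⟨h1, h2, h3, h4⟩
    exact ⟨i, ⟨h1, h2⟩, j, ⟨h3, h4⟩, rfl, rfl⟩

theorem scan_inv (b : PvGrid) (L : List (Int × Int)) :
    ∀ R : PySem.Set (Int × Int), (∀ p ∈ L, 0 ≤ p.1 ∧ 0 ≤ p.2) →
      L.foldl (pvStepA b) ((R.length : Int), zeroOn b R)
        = (((L.foldl (specStep b) R).length : Int), zeroOn b (L.foldl (specStep b) R)) := by
  induction L with
  | nil => intro R _; rfl
  | cons p L ih =>
    intro R hL
    obtain ⟨hi, hj⟩ := hL p List.mem_cons_self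
    simp only [List.foldl_cons]
    have hstep : pvStepA b ((R.length : Int), zeroOn b R) p
        = (((specStep b R p).length : Int), zeroOn b (specStep b R p)) := by
      obtain ⟨i, j⟩ := p
      unfold pvStepA specStep blkA
      by_cases hmatch : pvCell b i j = pvCell b (i+1) j ∧ pvCell b (i+1) j = pvCell b i (j+1) ∧
          pvCell b i (j+1) = pvCell b (i+1) (j+1)
      · by_cases hv : pvCell b i j = none
        · have h2 : pvCell b (i+1) j = none := by rw [← hmatch.1]; exact hv
          have h3 : pvCell b i (j+1) = none := by rw [← hmatch.2.1, ← hmatch.1]; exact hv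
          have h4 : pvCell b (i+1) (j+1) = none := by rw [← hmatch.2.2]; exact h3
          rw [if_pos hmatch, if_neg (by simp [hv])]
          rw [pvClearCellA_none b R _ _ hi hj hv,
              pvClearCellA_none b R _ _ (by omega) hj h2,
              pvClearCellA_none b R _ _ hi (by omega) h3,
              pvClearCellA_none b R _ _ (by omega) (by omega) h4]
        · have h2 : pvCell b (i+1) j ≠ none := by rw [← hmatch.1]; exact hv
          have h3 : pvCell b i (j+1) ≠ none := by rw [← hmatch.2.1, ← hmatch.1]; exact hv
          have h4 : pvCell b (i+1) (j+1) ≠ none := by rw [← hmatch.2.2]; exact h3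
          rw [if_pos hmatch, if_pos ⟨hv, hmatch⟩]
          rw [pvClearCellA_eq_add b R i j hi hj hv,
              pvClearCellA_eq_add b _ (i+1) j (by omega) hj h2,
              pvClearCellA_eq_add b _ i (j+1) hi (by omega) h3,
              pvClearCellA_eq_add b _ (i+1) (j+1) (by omega) (by omega) h4]
          rfl
      · rw [if_neg hmatch, if_neg (fun hc => hmatch hc.2)]
    rw [hstep]
    exact ih (specStep b R p) (fun q hq => hL q (List.mem_cons_of_mem _ hq))

-- A's scan: count of freshly cleared cells = cardinality of the coordinate set, cleared copy = zeroOn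
theorem pvCheckA_eq (m n : Int) (b : PvGrid) :
    pvCheckA m n b = (((specDetect m n b).length : Int), zeroOn b (specDetect m n b)) := by
  rw [pvCheckA_eq_foldl]
  unfold specDetect
  have h := scan_inv b (pvPairs m n) [] (pvPairs_nonneg m n)
  simpa [zeroOn_nil] using h

theorem mem_foldl_specStep (b : PvGrid) (L : List (Int × Int)) :
    ∀ (S : PySem.Set (Int × Int)) (x : Int × Int),
      (x ∈ L.foldl (specStep b) S ↔ x ∈ S ∨ ∃ p ∈ L, matchA b p.1 p.2 ∧ x ∈ blkA p) := by
  induction L with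
  | nil => intro S x; simp
  | cons p L ih =>
    intro S x
    simp only [List.foldl_cons]
    rw [ih]
    unfold specStep
    by_cases h : matchA b p.1 p.2
    · unfold matchA at h
      rw [if_pos h]
      simp only [PySem.Set.mem_update, List.mem_cons]
      constructor
      · rintro ((hx | hx) | ⟨q, hq, hc, hb⟩)
        · exact Or.inl hx
        · exact Or.inr ⟨p, Or.inl rfl, h, hx⟩
        · exact Or.inr ⟨q, Or.inr hq, hc, hb⟩
      · rintro (hx | ⟨q, (rfl | hq), hc, hb⟩)
        · exact Or.inl (Or.inl hx)
        · exact Or.inl (Or.inr hb)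
        · exact Or.inr ⟨q, hq, hc, hb⟩
    · have h' := h
      unfold matchA at h'
      rw [if_neg h']
      constructor
      · rintro (hx | ⟨q, hq, hc, hb⟩)
        · exact Or.inl hx
        · exact Or.inr ⟨q, List.mem_cons_of_mem _ hq, hc, hb⟩
      · rintro (hx | ⟨q, hq2, hc, hb⟩)
        · exact Or.inl hx
        · rcases List.mem_cons.mp hq2 with rfl | hq
          · exact absurd hc h
          · exact Or.inr ⟨q, hq, hc, hb⟩

theorem mem_specDetect (m n : Int) (b : PvGrid) (x : Int × Int) :
    x ∈ specDetect m n b ↔ ∃ p ∈ pvPairs m n, matchA b p.1 p.2 ∧ x ∈ blkA p := by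
  unfold specDetect
  rw [mem_foldl_specStep]
  simp

theorem nodup_foldl_specStep (b : PvGrid) (L : List (Int × Int)) :
    ∀ S : PySem.Set (Int × Int), S.Nodup → (L.foldl (specStep b) S).Nodup := by
  induction L with
  | nil => intro S h; exact h
  | cons p L ih =>
    intro S h
    simp only [List.foldl_cons]
    refine ih _ ?_
    unfold specStep
    split
    · exact PySem.Set.nodup_update _ _ h
    · exact h

theorem nodup_specDetect (m n : Int) (b : PvGrid) : (specDetect m n b).Nodup :=
  nodup_foldl_specStep b _ _ List.nodup_nil

-- ===== B-side characterizations =====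

def hitCond (cols : List (List Char)) (j k : Int) : Prop :=
  PySem.List.pyGetD (pvColAt cols j) k ' ' = PySem.List.pyGetD (pvColAt cols j) (k+1) ' ' ∧
  PySem.List.pyGetD (pvColAt cols j) (k+1) ' ' = PySem.List.pyGetD (pvColAt cols (j+1)) k ' ' ∧
  PySem.List.pyGetD (pvColAt cols (j+1)) k ' ' = PySem.List.pyGetD (pvColAt cols (j+1)) (k+1) ' '

def blkB (q : Int × Int) : List (Int × Int) := [(q.1, q.2), (q.1, q.2+1), (q.1+1, q.2), (q.1+1, q.2+1)]

def pvLenCol (cols : List (List Char)) (j : Int) : Int := ((pvColAt cols j).length : Int)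

def pvPairsB (n : Int) (cols : List (List Char)) : List (Int × Int) :=
  (PySem.List.pyRange 0 (n-1) 1).flatMap (fun j =>
    (PySem.List.pyRange 0 (min (pvLenCol cols j) (pvLenCol cols (j+1)) - 1) 1).map (fun k => (j, k)))

def hitStep (cols : List (List Char)) (H : PySem.Set (Int × Int)) (q : Int × Int) : PySem.Set (Int × Int) :=
  if PySem.List.pyGetD (pvColAt cols q.1) q.2 ' ' = PySem.List.pyGetD (pvColAt cols q.1) (q.2+1) ' ' ∧
     PySem.List.pyGetD (pvColAt cols q.1) (q.2+1) ' ' = PySem.List.pyGetD (pvColAt cols (q.1+1)) q.2 ' ' ∧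
     PySem.List.pyGetD (pvColAt cols (q.1+1)) q.2 ' ' = PySem.List.pyGetD (pvColAt cols (q.1+1)) (q.2+1) ' ' then
    PySem.Set.update H (blkB q)
  else H

theorem pvHitB_eq_foldl (n : Int) (cols : List (List Char)) :
    pvHitB n cols = (pvPairsB n cols).foldl (hitStep cols) [] := by
  unfold pvHitB pvPairsB pvLenCol hitStep blkB
  rw [List.foldl_flatMap]
  simp only [List.foldl_map, PySem.List.len_eq]
  rfl

theorem mem_pvPairsB (n : Int) (cols : List (List Char)) (q : Int × Int) :
    q ∈ pvPairsB n cols ↔ 0 ≤ q.1 ∧ q.1 < n-1 ∧ 0 ≤ q.2 ∧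
      q.2 < min (pvLenCol cols q.1) (pvLenCol cols (q.1+1)) - 1 := by
  unfold pvPairsB
  obtain ⟨j, k⟩ := q
  simp only [List.mem_flatMap, List.mem_map, PySem.List.mem_pyRange_one, Prod.mk.injEq]
  constructor
  · rintro ⟨a, ha, b, hb, rfl, rfl⟩
    exact ⟨ha.1, ha.2, hb.1, hb.2⟩
  · rintro ⟨h1, h2, h3, h4⟩
    exact ⟨j, ⟨h1, h2⟩, k, ⟨h3, h4⟩, rfl, rfl⟩

theorem mem_foldl_hitStep (cols : List (List Char)) (L : List (Int × Int)) :
    ∀ (S : PySem.Set (Int × Int)) (x : Int × Int),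
      (x ∈ L.foldl (hitStep cols) S ↔ x ∈ S ∨ ∃ q ∈ L, hitCond cols q.1 q.2 ∧ x ∈ blkB q) := by
  induction L with
  | nil => intro S x; simp
  | cons p L ih =>
    intro S x
    simp only [List.foldl_cons]
    rw [ih]
    unfold hitStep
    by_cases h : hitCond cols p.1 p.2
    · unfold hitCond at h
      rw [if_pos h]
      simp only [PySem.Set.mem_update, List.mem_cons]
      constructor
      · rintro ((hx | hx) | ⟨q, hq, hc, hb⟩)
        · exact Or.inl hx
        · exact Or.inr ⟨p, Or.inl rfl, h, hx⟩
        · exact Or.inr ⟨q, Or.inr hq, hc, hb⟩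
      · rintro (hx | ⟨q, (rfl | hq), hc, hb⟩)
        · exact Or.inl (Or.inl hx)
        · exact Or.inl (Or.inr hb)
        · exact Or.inr ⟨q, hq, hc, hb⟩
    · unfold hitCond at h
      rw [if_neg h]
      constructor
      · rintro (hx | ⟨q, hq, hc, hb⟩)
        · exact Or.inl hx
        · exact Or.inr ⟨q, List.mem_cons_of_mem _ hq, hc, hb⟩
      · rintro (hx | ⟨q, hq2, hc, hb⟩)
        · exact Or.inl hx
        · rcases List.mem_cons.mp hq2 with rfl | hq
          · exact absurd hc h
          · exact Or.inr ⟨q, hq, hc, hb⟩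

theorem mem_pvHitB (n : Int) (cols : List (List Char)) (x : Int × Int) :
    x ∈ pvHitB n cols ↔ ∃ q ∈ pvPairsB n cols, hitCond cols q.1 q.2 ∧ x ∈ blkB q := by
  rw [pvHitB_eq_foldl, mem_foldl_hitStep]
  simp

theorem nodup_pvHitB (n : Int) (cols : List (List Char)) : (pvHitB n cols).Nodup := by
  rw [pvHitB_eq_foldl]
  generalize pvPairsB n cols = L
  suffices h : ∀ S : PySem.Set (Int × Int), S.Nodup → (L.foldl (hitStep cols) S).Nodup from
    h [] List.nodup_nil
  induction L with
  | nil => intro S h; exact h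
  | cons p L ih =>
    intro S h
    simp only [List.foldl_cons]
    refine ih _ ?_
    unfold hitStep
    split
    · exact PySem.Set.nodup_update _ _ h
    · exact h

-- ===== the representation invariant =====

def repCell (m : Int) (cols : List (List Char)) (i j : Int) : Option Char :=
  if m-1-i < pvLenCol cols j then some ((pvColAt cols j).getD (m-1-i).toNat ' ') else none

def WinEq (m n : Int) (g : PvGrid) (cols : List (List Char)) : Prop :=
  ∀ i j : Int, 0 ≤ i → i < m → 0 ≤ j → j < n → pvCell g i j = repCell m cols i j

def ColsOK (m n : Int) (cols : List (List Char)) : Prop :=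
  cols.length = n.toNat ∧ ∀ col ∈ cols, col.length ≤ m.toNat

theorem len_colAt_le {t : Nat} {cols : List (List Char)}
    (hc : ∀ col ∈ cols, col.length ≤ t) {j : Int} (hj : 0 ≤ j) :
    (pvColAt cols j).length ≤ t := by
  unfold pvColAt
  rw [PySem.List.pyGetD_of_nonneg _ _ hj]
  by_cases h : j.toNat < cols.length
  · rw [List.getD_eq_getElem _ _ h]
    exact hc _ (List.getElem_mem h)
  · rw [List.getD_eq_default _ _ (Nat.le_of_not_lt h)]
    exact Nat.zero_le _

theorem match_corr {m n : Int} {g : PvGrid} {cols : List (List Char)}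
    (hW : WinEq m n g cols)
    (j k : Int) (hj0 : 0 ≤ j) (hj1 : j < n-1) (hk0 : 0 ≤ k) (hk1 : k < m-1) :
    (matchA g (m-2-k) j ↔ (k < min (pvLenCol cols j) (pvLenCol cols (j+1)) - 1 ∧ hitCond cols j k)) := by
  have e00 := hW (m-2-k) j (by omega) (by omega) (by omega) (by omega)
  have e10 := hW (m-2-k+1) j (by omega) (by omega) (by omega) (by omega)
  have e01 := hW (m-2-k) (j+1) (by omega) (by omega) (by omega) (by omega)
  have e11 := hW (m-2-k+1) (j+1) (by omega) (by omega) (by omega) (by omega)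
  unfold repCell at e00 e10 e01 e11
  rw [show m-1-(m-2-k) = k+1 from by omega] at e00 e01
  rw [show m-1-(m-2-k+1) = k from by omega] at e10 e11
  unfold matchA hitCond
  rw [e00, e10, e01, e11,
      PySem.List.pyGetD_of_nonneg _ _ hk0, PySem.List.pyGetD_of_nonneg _ _ hk0,
      PySem.List.pyGetD_of_nonneg _ _ (by omega : (0:Int) ≤ k+1),
      PySem.List.pyGetD_of_nonneg _ _ (by omega : (0:Int) ≤ k+1)]
  by_cases hL1 : k+1 < pvLenCol cols j
  · by_cases hL2 : k+1 < pvLenCol cols (j+1)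
    · rw [if_pos hL1, if_pos hL2, if_pos (by omega : k < pvLenCol cols j),
          if_pos (by omega : k < pvLenCol cols (j+1))]
      simp only [ne_eq, reduceCtorEq, not_false_eq_true, true_and, Option.some.injEq]
      constructor
      · rintro ⟨q1, q2, q3⟩
        exact ⟨by omega, q1.symm, q1.trans (q2.trans q3), q3.symm⟩
      · rintro ⟨-, r1, r2, r3⟩
        exact ⟨r1.symm, r1.trans (r2.trans r3), r3.symm⟩
    · rw [if_neg hL2, if_pos hL1, if_pos (by omega : k < pvLenCol cols j)]
      constructor
      · rintro ⟨-, -, q2, -⟩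
        exact absurd q2 (by simp)
      · rintro ⟨hk, -⟩
        exact absurd hk (by omega)
  · rw [if_neg hL1]
    constructor
    · rintro ⟨q, -⟩
      exact absurd rfl q
    · rintro ⟨hk, -⟩
      exact absurd hk (by omega)

-- the two detected sets correspond under (i, j) ↦ (j, m-1-i)
theorem det_iff_hit {m n : Int} {g : PvGrid} {cols : List (List Char)}
    (hW : WinEq m n g cols) (hC : ColsOK m n cols) (x : Int × Int) :
    x ∈ specDetect m n g ↔ (x.2, m-1-x.1) ∈ pvHitB n cols := by
  rw [mem_specDetect, mem_pvHitB]
  constructor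
  · rintro ⟨⟨i, j⟩, hp, hm, hblk⟩
    rw [mem_pvPairs] at hp
    dsimp only at hp hm hblk
    obtain ⟨h1, h2, h3, h4⟩ := hp
    have hk := (match_corr hW j (m-2-i) h3 h4 (by omega) (by omega)).mp
      (by simpa [show m-2-(m-2-i) = i from by omega] using hm)
    refine ⟨(j, m-2-i), ?_, hk.2, ?_⟩
    · rw [mem_pvPairsB]
      exact ⟨h3, h4, by omega, hk.1⟩
    · obtain ⟨x1, x2⟩ := x
      unfold blkA at hblk
      unfold blkB
      simp only [List.mem_cons, Prod.mk.injEq, List.not_mem_nil, or_false] at hblk ⊢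
      omega
  · rintro ⟨⟨j, k⟩, hq, hcnd, hblk⟩
    rw [mem_pvPairsB] at hq
    dsimp only at hq hcnd hblk
    obtain ⟨h1, h2, h3, h4⟩ := hq
    have hkm : k < m-1 := by
      have l1 : (pvColAt cols j).length ≤ m.toNat := len_colAt_le hC.2 h1
      have l2 : pvLenCol cols j ≤ (m.toNat : Int) := by
        unfold pvLenCol; exact_mod_cast l1
      omega
    have hm' := (match_corr hW j k h1 h2 h3 hkm).mpr ⟨h4, hcnd⟩
    refine ⟨(m-2-k, j), ?_, hm', ?_⟩
    · rw [mem_pvPairs]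
      exact ⟨by omega, by omega, h1, h2⟩
    · obtain ⟨x1, x2⟩ := x
      unfold blkB at hblk
      unfold blkA
      simp only [List.mem_cons, Prod.mk.injEq, List.not_mem_nil, or_false] at hblk ⊢
      omega

theorem len_det_eq {m n : Int} {g : PvGrid} {cols : List (List Char)}
    (hW : WinEq m n g cols) (hC : ColsOK m n cols) :
    (specDetect m n g).length = (pvHitB n cols).length := by
  rw [← List.toFinset_card_of_nodup (nodup_specDetect m n g),
      ← List.toFinset_card_of_nodup (nodup_pvHitB n cols)]
  refine Finset.card_bij (fun p _ => (p.2, m-1-p.1)) ?_ ?_ ?_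
  · intro p hp
    rw [List.mem_toFinset] at hp ⊢
    exact (det_iff_hit hW hC p).mp hp
  · intro p1 _ p2 _ he
    have e1 := congrArg Prod.fst he
    have e2 := congrArg Prod.snd he
    dsimp only at e1 e2
    exact Prod.ext (by omega) (by omega)
  · intro q hq
    obtain ⟨a, b⟩ := q
    rw [List.mem_toFinset] at hq
    refine ⟨(m-1-b, a), ?_, ?_⟩
    · rw [List.mem_toFinset, det_iff_hit hW hC]
      simpa [show m-1-(m-1-b) = b from by omega] using hq
    · exact Prod.ext (by dsimp only) (by dsimp only; omega)

-- ===== A's gravity characterized (reused machinery) =====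

-- the non-sentinel cells of column j, top to bottom
def pvColTD (g : PvGrid) (m j : Int) : List (Option Char) :=
  ((PySem.List.pyRange 0 m 1).filter (fun i => decide (pvCell g i j ≠ none))).map (fun i => pvCell g i j)

theorem tempA_eq (g : PvGrid) (m j : Int) :
    (PySem.List.pyRange (m-1) (-1) (-1)).foldl (fun temp row =>
      if pvCell g row j ≠ none then temp ++ [pvCell g row j] else temp) []
      = (pvColTD g m j).reverse := by
  rw [PySem.List.foldl_append_ite]
  have hr : PySem.List.pyRange (m-1) (-1) (-1) = (PySem.List.pyRange 0 m 1).reverse := by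
    have := PySem.List.pyRange_neg_one_eq_reverse (m-1) (-1)
    simpa using this
  rw [hr, List.filter_reverse, List.map_reverse]
  simp [pvColTD]

theorem pvColTD_length_le (g : PvGrid) (m j : Int) : (pvColTD g m j).length ≤ m.toNat := by
  unfold pvColTD
  calc _ = _ := List.length_map ..
    _ ≤ (PySem.List.pyRange 0 m 1).length := List.length_filter_le _ _
    _ = m.toNat := by rw [PySem.List.length_pyRange_one]; norm_num

-- the whole m×n grid as a function of (column, row)
def pvMapForm (m n : Int) (F : Int → Int → Option Char) : PvGrid :=
  (PySem.List.pyRange 0 m 1).map (fun r => (PySem.List.pyRange 0 n 1).map (fun c => F c r))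

theorem pvMapForm_congr (m n : Int) {F F' : Int → Int → Option Char}
    (h : ∀ c r : Int, 0 ≤ c → c < n → 0 ≤ r → r < m → F c r = F' c r) :
    pvMapForm m n F = pvMapForm m n F' := by
  unfold pvMapForm
  refine List.map_congr_left (fun r hr => ?_)
  refine List.map_congr_left (fun c hc => ?_)
  rw [PySem.List.mem_pyRange_one] at hr hc
  exact h c r hc.1 hc.2 hr.1 hr.2

theorem set_map_pyRange {β : Type} (n : Int) (f : Int → β) (c : Int) (v : β) (hc : 0 ≤ c) :
    ((PySem.List.pyRange 0 n 1).map f).set c.toNat v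
      = (PySem.List.pyRange 0 n 1).map (fun x => if x = c then v else f x) := by
  apply List.ext_getElem (by simp)
  intro q h1 h2
  rw [List.getElem_set, List.getElem_map, List.getElem_map, PySem.List.getElem_pyRange_one]
  have hq : q < (n - 0).toNat := by simpa [PySem.List.length_pyRange_one] using h2
  by_cases hqc : c.toNat = q
  · rw [if_pos hqc, if_pos (by omega)]
  · rw [if_neg hqc, if_neg (by omega)]

theorem set_mapForm (m n : Int) (F : Int → Int → Option Char) {row c : Int} (v : Option Char)
    (hr : 0 ≤ row) (hrm : row < m) (hc : 0 ≤ c) :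
    pvSetCell (pvMapForm m n F) row c v
      = pvMapForm m n (fun c' r => if c' = c ∧ r = row then v else F c' r) := by
  rw [pvSetCell_nonneg _ _ hr hc]
  unfold pvMapForm
  have hlt : row.toNat < ((PySem.List.pyRange 0 m 1).map
      (fun r => (PySem.List.pyRange 0 n 1).map (fun c => F c r))).length := by
    simp [PySem.List.length_pyRange_one]; omega
  rw [List.getD_eq_getElem _ _ hlt, List.getElem_map, PySem.List.getElem_pyRange_one]
  have hrow : (0 : Int) + (row.toNat : Int) = row := by omega
  rw [hrow, set_map_pyRange n _ c v hc, set_map_pyRange m _ row _ hr]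
  refine List.map_congr_left (fun r hrr => ?_)
  rw [PySem.List.mem_pyRange_one] at hrr
  by_cases hre : r = row
  · subst hre
    rw [if_pos rfl]
    refine List.map_congr_left (fun c' hcc => ?_)
    by_cases hce : c' = c
    · subst hce; simp
    · simp [hce]
  · rw [if_neg hre]
    refine List.map_congr_left (fun c' hcc => ?_)
    simp [hre]

-- the inner `for i in range(len(temp))` write loop of A's move, one column
theorem colwrite (m n : Int) (c : Int) (hc : 0 ≤ c) (temp : List (Option Char))
    (hk : temp.length ≤ m.toNat) (F : Int → Int → Option Char) :
    ∀ t : Nat, t ≤ temp.length →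
      (PySem.List.pyRange 0 (t : Int) 1).foldl (fun res i =>
          pvSetCell res (m-1-i) c (PySem.List.pyGetD temp i none)) (pvMapForm m n F)
        = pvMapForm m n (fun c' r =>
            if c' = c ∧ m - (t : Int) ≤ r then PySem.List.pyGetD temp (m-1-r) none else F c' r) := by
  intro t
  induction t with
  | zero =>
    intro _
    rw [PySem.List.pyRange_one_eq_nil (by norm_num)]
    simp only [List.foldl_nil]
    refine pvMapForm_congr m n (fun c' r h1 h2 h3 h4 => ?_)
    rw [if_neg (by push_cast; omega)]
  | succ t ih =>
    intro ht
    have ht' : t ≤ temp.length := by omega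
    have hcast : ((t + 1 : Nat) : Int) = (t : Int) + 1 := by push_cast; ring
    rw [hcast, PySem.List.pyRange_one_succ_right (by positivity), List.foldl_append,
        ih ht', List.foldl_cons, List.foldl_nil,
        set_mapForm m n _ _ (by omega) (by omega) hc]
    refine pvMapForm_congr m n (fun c' r h1 h2 h3 h4 => ?_)
    by_cases hce : c' = c
    · subst hce
      by_cases hre : r = m - 1 - (t : Int)
      · rw [if_pos ⟨rfl, hre⟩, if_pos ⟨rfl, by omega⟩]
        have hmr : m - 1 - r = (t : Int) := by omega
        rw [hmr]
      · rw [if_neg (fun h => hre h.2)]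
        by_cases hge : m - (t : Int) ≤ r
        · rw [if_pos ⟨rfl, hge⟩, if_pos ⟨rfl, by omega⟩]
        · rw [if_neg (fun h => hge h.2), if_neg (fun h => by omega)]
    · rw [if_neg (fun h => hce h.1), if_neg (fun h => hce h.1), if_neg (fun h => hce h.1)]

-- the grid contents after gravity has been applied to the columns listed in P
def pvColG (g : PvGrid) (m : Int) (P : List Int) (c r : Int) : Option Char :=
  if c ∈ P ∧ m - ((pvColTD g m c).length : Int) ≤ r
  then PySem.List.pyGetD ((pvColTD g m c).reverse) (m-1-r) none else none

theorem movefold (m n : Int) (g : PvGrid) :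
    ∀ (cs P : List Int), (∀ c ∈ cs, c ∉ P) → cs.Nodup → (∀ c ∈ cs, 0 ≤ c) →
      cs.foldl (fun result col =>
        (PySem.List.pyRange 0 (PySem.List.len ((pvColTD g m col).reverse)) 1).foldl (fun res i =>
          pvSetCell res (m-1-i) col (PySem.List.pyGetD ((pvColTD g m col).reverse) i none)) result)
        (pvMapForm m n (pvColG g m P))
      = pvMapForm m n (pvColG g m (P ++ cs)) := by
  intro cs
  induction cs with
  | nil => intro P _ _ _; simp
  | cons c cs ih =>
    intro P hP hnd hnn
    simp only [List.foldl_cons]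
    have hlen : PySem.List.len ((pvColTD g m c).reverse) = (((pvColTD g m c).reverse.length : Nat) : Int) := by
      simp
    have hk : (pvColTD g m c).reverse.length ≤ m.toNat := by
      rw [List.length_reverse]; exact pvColTD_length_le g m c
    rw [hlen, colwrite m n c (hnn c List.mem_cons_self) _ hk _ _ (le_refl _)]
    have hstep : pvMapForm m n (fun c' r =>
        if c' = c ∧ m - ((pvColTD g m c).reverse.length : Int) ≤ r
        then PySem.List.pyGetD ((pvColTD g m c).reverse) (m-1-r) none
        else pvColG g m P c' r)
        = pvMapForm m n (pvColG g m (P ++ [c])) := by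
      refine pvMapForm_congr m n (fun c' r h1 h2 h3 h4 => ?_)
      by_cases hce : c' = c
      · subst hce
        have hcP : c' ∉ P := hP c' List.mem_cons_self
        rw [List.length_reverse]
        by_cases hge : m - ((pvColTD g m c').length : Int) ≤ r
        · rw [if_pos ⟨rfl, hge⟩]
          unfold pvColG
          rw [if_pos ⟨by simp, hge⟩]
        · rw [if_neg (fun h => hge h.2)]
          unfold pvColG
          rw [if_neg (fun h => hcP h.1), if_neg (fun h => hge h.2)]
      · rw [if_neg (fun h => hce h.1)]
        unfold pvColG
        by_cases hm : c' ∈ P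
        · simp only [List.mem_append, List.mem_singleton, hm, true_or]
        · have hm' : c' ∉ P ++ [c] := by simp [hm, hce]
          rw [if_neg (fun h => hm h.1), if_neg (fun h => hm' h.1)]
    rw [hstep, ih (P ++ [c]) (fun x hx => by
          simp only [List.mem_append, List.mem_singleton]
          rintro (h | h)
          · exact hP x (List.mem_cons_of_mem _ hx) h
          · exact (List.nodup_cons.mp hnd).1 (h ▸ hx))
        (List.nodup_cons.mp hnd).2 (fun x hx => hnn x (List.mem_cons_of_mem _ hx))]
    rw [List.append_assoc, List.singleton_append]

theorem pvMoveA_eq (m n : Int) (g : PvGrid) :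
    pvMoveA m n g = pvMapForm m n (pvColG g m (PySem.List.pyRange 0 n 1)) := by
  unfold pvMoveA
  simp only []
  rw [PySem.List.foldl_congr_mem _ _ (fun result col =>
        (PySem.List.pyRange 0 (PySem.List.len ((pvColTD g m col).reverse)) 1).foldl (fun res i =>
          pvSetCell res (m-1-i) col (PySem.List.pyGetD ((pvColTD g m col).reverse) i none)) result) _
        (fun acc x _ => by rw [tempA_eq])]
  have hinit : (PySem.List.pyRange 0 m 1).map
        (fun _ => (PySem.List.pyRange 0 n 1).map (fun _ => (none : Option Char)))
      = pvMapForm m n (pvColG g m []) := by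
    unfold pvMapForm
    refine List.map_congr_left (fun r _ => ?_)
    refine List.map_congr_left (fun c _ => ?_)
    simp [pvColG]
  rw [hinit, movefold m n g (PySem.List.pyRange 0 n 1) [] (fun c _ => List.not_mem_nil)
        (PySem.List.nodup_pyRange_one 0 n) (fun c hc => ((PySem.List.mem_pyRange_one).mp hc).1),
      List.nil_append]

-- ===== the dropped columns match A's gravity output =====

theorem dropB_len (hit : PySem.Set (Int × Int)) (cols : List (List Char)) :
    (pvDropB hit cols).length = cols.length := by
  simp [pvDropB, PySem.List.length_enumerate]

theorem colAt_dropB (hit : PySem.Set (Int × Int)) (cols : List (List Char))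
    {c : Int} (hc0 : 0 ≤ c) (hc : c.toNat < cols.length) :
    pvColAt (pvDropB hit cols) c
      = (PySem.List.enumerate (cols[c.toNat]'hc)).filterMap (fun kc =>
          if (c, kc.1) ∈ hit then none else some kc.2) := by
  unfold pvColAt pvDropB
  rw [PySem.List.pyGetD_of_nonneg _ _ hc0,
      List.getD_eq_getElem _ _ (by simpa [PySem.List.length_enumerate] using hc),
      List.getElem_map, PySem.List.getElem_enumerate]
  simp [Int.toNat_of_nonneg hc0]

-- indices flipped i ↦ m-1-i: a scan of the rows top-down is the reversed scan of the heights bottom-up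
theorem filter_map_flip {α : Type} (m : Int) (P : Int → Bool) (F : Int → α) :
    ((PySem.List.pyRange 0 m 1).filter (fun i => P (m-1-i))).map (fun i => F (m-1-i))
      = (((PySem.List.pyRange 0 m 1).filter P).map F).reverse := by
  have hmap : (PySem.List.pyRange 0 m 1).map (fun i => m-1-i) = (PySem.List.pyRange 0 m 1).reverse := by
    apply List.ext_getElem (by simp)
    intro t h1 h2
    rw [List.getElem_map, List.getElem_reverse, PySem.List.getElem_pyRange_one,
        PySem.List.getElem_pyRange_one]
    have hlen : t < (m - 0).toNat := by
      simpa [PySem.List.length_pyRange_one] using h2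
    have hlen2 : (PySem.List.pyRange 0 m 1).length = (m - 0).toNat :=
      PySem.List.length_pyRange_one 0 m
    rw [hlen2]
    omega
  calc ((PySem.List.pyRange 0 m 1).filter (fun i => P (m-1-i))).map (fun i => F (m-1-i))
      = (((PySem.List.pyRange 0 m 1).filter (fun i => P (m-1-i))).map (fun i => m-1-i)).map F := by
        rw [List.map_map]; rfl
    _ = (((PySem.List.pyRange 0 m 1).map (fun i => m-1-i)).filter P).map F := by
        rw [List.filter_map]; rfl
    _ = (((PySem.List.pyRange 0 m 1).reverse).filter P).map F := by rw [hmap]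
    _ = (((PySem.List.pyRange 0 m 1).filter P).map F).reverse := by
        rw [List.filter_reverse, List.map_reverse]

theorem filterMap_ite_none {α : Type} (l : List Int) (Q : Int → Prop) [DecidablePred Q]
    (f : Int → α) :
    l.filterMap (fun h => if Q h then none else some (f h))
      = (l.filter (fun h => decide (¬ Q h))).map f := by
  induction l with
  | nil => rfl
  | cons a l ih =>
    by_cases h : Q a <;> simp [h, ih]

theorem colTD_drop {m n : Int} {g : PvGrid} {cols : List (List Char)}
    (hW : WinEq m n g cols) (hC : ColsOK m n cols) (hm0 : 0 ≤ m)
    {c : Int} (hc0 : 0 ≤ c) (hcn : c < n) :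
    pvColTD (zeroOn g (specDetect m n g)) m c
      = ((pvColAt (pvDropB (pvHitB n cols) cols) c).map some).reverse := by
  have hcN : c.toNat < cols.length := by
    rw [hC.1]; omega
  have hcolAt : pvColAt cols c = cols[c.toNat] := by
    unfold pvColAt
    rw [PySem.List.pyGetD_of_nonneg _ _ hc0, List.getD_eq_getElem _ _ hcN]
  have hLc : ((pvColAt cols c).length : Int) ≤ m := by
    have := len_colAt_le hC.2 hc0
    omega
  -- each cleared cell of column c, read at row i, is wCol at height m-1-i
  have hcell : ∀ i : Int, 0 ≤ i → i < m →
      pvCell (zeroOn g (specDetect m n g)) i c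
        = (if (c, m-1-i) ∈ pvHitB n cols then none
           else if m-1-i < pvLenCol cols c
                then some ((pvColAt cols c).getD (m-1-i).toNat ' ') else none) := by
    intro i hi0 him
    rw [pvCell_zeroOn g _ hi0 hc0]
    have hRiff := det_iff_hit hW hC (i, c)
    by_cases hmem : (c, m-1-i) ∈ pvHitB n cols
    · rw [if_pos (hRiff.mpr hmem), if_pos hmem]
    · rw [if_neg (fun hx => hmem (hRiff.mp hx)), if_neg hmem,
          hW i c hi0 him hc0 hcn]
      rfl
  unfold pvColTD
  rw [List.filter_congr (l := PySem.List.pyRange 0 m 1)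
        (q := fun i => decide ((if (c, m-1-i) ∈ pvHitB n cols then none
           else if m-1-i < pvLenCol cols c
                then some ((pvColAt cols c).getD (m-1-i).toNat ' ') else none) ≠ none))
        (fun i hi => by
          obtain ⟨hi0, him⟩ := (PySem.List.mem_pyRange_one).mp hi
          rw [hcell i hi0 him]),
      List.map_congr_left (fun i hi => by
          obtain ⟨hi0, him⟩ := (PySem.List.mem_pyRange_one).mp (List.mem_of_mem_filter hi)
          rw [hcell i hi0 him]),
      filter_map_flip m
        (fun h => decide ((if (c, h) ∈ pvHitB n cols then none
           else if h < pvLenCol cols c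
                then some ((pvColAt cols c).getD h.toNat ' ') else none) ≠ none))
        (fun h => (if (c, h) ∈ pvHitB n cols then none
           else if h < pvLenCol cols c
                then some ((pvColAt cols c).getD h.toNat ' ') else none))]
  congr 1
  -- bottom-up: the kept heights of column c are exactly the unmarked ones below its length
  have hLc0 : (0:Int) ≤ pvLenCol cols c := by unfold pvLenCol; positivity
  have hsplit := PySem.List.pyRange_one_append 0 (pvLenCol cols c) m hLc0 (by unfold pvLenCol; omega)
  have h2nil : (PySem.List.pyRange (pvLenCol cols c) m 1).filter
      (fun h => decide ((if (c, h) ∈ pvHitB n cols then none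
           else if h < pvLenCol cols c
                then some ((pvColAt cols c).getD h.toNat ' ') else none) ≠ none)) = [] :=
    List.filter_eq_nil_iff.mpr (fun h hh => by
        obtain ⟨hh1, hh2⟩ := (PySem.List.mem_pyRange_one).mp hh
        simp only [if_neg (by omega : ¬ h < pvLenCol cols c), ite_self, ne_eq,
          not_true_eq_false, decide_false, Bool.false_eq_true, not_false_eq_true])
  rw [hsplit, List.filter_append, h2nil, List.append_nil,
      List.filter_congr (fun h hh => by
        obtain ⟨hh1, hh2⟩ := (PySem.List.mem_pyRange_one).mp hh
        show _ = decide ((c, h) ∉ pvHitB n cols)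
        by_cases hmem : (c, h) ∈ pvHitB n cols
        · simp [hmem]
        · simp [hmem, if_pos hh2]),
      List.map_congr_left (fun h hh => by
        have hh' := List.mem_of_mem_filter hh
        obtain ⟨hh1, hh2⟩ := (PySem.List.mem_pyRange_one).mp hh'
        have hnm : (c, h) ∉ pvHitB n cols := by
          have := List.of_mem_filter hh
          simpa using this
        rw [if_neg hnm, if_pos hh2])]
  -- the dropped column, via enumerate over a bottom-up range
  rw [colAt_dropB _ _ hc0 hcN, PySem.List.enumerate_eq_map_pyRange _ ' ', List.filterMap_map]
  have hcomp : ((fun kc : Int × Char => if (c, kc.1) ∈ pvHitB n cols then none else some kc.2) ∘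
        (fun j => (j, PySem.List.pyGetD (cols[c.toNat]'hcN) j ' ')))
      = fun h => if (c, h) ∈ pvHitB n cols then none
                 else some (PySem.List.pyGetD (cols[c.toNat]'hcN) h ' ') := rfl
  rw [hcomp, filterMap_ite_none _ (fun h => (c, h) ∈ pvHitB n cols) _, List.map_map]
  have hlen : PySem.List.len (cols[c.toNat]'hcN) = pvLenCol cols c := by
    rw [PySem.List.len_eq, ← hcolAt]
    rfl
  rw [hlen]
  refine List.map_congr_left (fun h hh => ?_)
  have hh' := List.mem_of_mem_filter hh
  obtain ⟨hh1, hh2⟩ := (PySem.List.mem_pyRange_one).mp hh'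
  simp only [Function.comp_apply]
  rw [PySem.List.pyGetD_of_nonneg _ _ hh1, ← hcolAt]

theorem winEq_next {m n : Int} {g : PvGrid} {cols : List (List Char)}
    (hW : WinEq m n g cols) (hC : ColsOK m n cols) (hm0 : 0 ≤ m) :
    WinEq m n (pvMapForm m n (pvColG (zeroOn g (specDetect m n g)) m (PySem.List.pyRange 0 n 1)))
      (pvDropB (pvHitB n cols) cols) := by
  intro r c hr0 hrm hc0 hcn
  unfold pvCell pvMapForm
  rw [PySem.List.pyGetD_map_pyRange_of_nonneg _ _ _ _ hr0 hrm,
      PySem.List.pyGetD_map_pyRange_of_nonneg _ _ _ _ hc0 hcn]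
  unfold pvColG
  have htd := colTD_drop hW hC hm0 hc0 hcn
  have hrev : (pvColTD (zeroOn g (specDetect m n g)) m c).reverse
      = (pvColAt (pvDropB (pvHitB n cols) cols) c).map some := by
    rw [htd, List.reverse_reverse]
  have hlen : ((pvColTD (zeroOn g (specDetect m n g)) m c).length : Int)
      = pvLenCol (pvDropB (pvHitB n cols) cols) c := by
    rw [htd]
    unfold pvLenCol
    simp
  unfold repCell
  by_cases hge : m-1-r < pvLenCol (pvDropB (pvHitB n cols) cols) c
  · rw [if_pos ⟨(PySem.List.mem_pyRange_one).mpr ⟨hc0, hcn⟩, by omega⟩, if_pos hge, hrev,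
        PySem.List.pyGetD_of_nonneg _ _ (by omega : (0:Int) ≤ m-1-r)]
    have ht : (m-1-r).toNat < (pvColAt (pvDropB (pvHitB n cols) cols) c).length := by
      unfold pvLenCol at hge
      omega
    rw [List.getD_eq_getElem _ _ (by simpa using ht), List.getElem_map,
        List.getD_eq_getElem _ _ ht]
  · rw [if_neg (fun hx => hge (by omega)), if_neg hge]

theorem colsOK_next {m n : Int} {cols : List (List Char)} (hC : ColsOK m n cols)
    (hit : PySem.Set (Int × Int)) : ColsOK m n (pvDropB hit cols) := by
  constructor
  · rw [dropB_len]
    exact hC.1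
  · intro col hcol
    unfold pvDropB at hcol
    obtain ⟨jc, hjc, rfl⟩ := List.mem_map.mp hcol
    obtain ⟨k, hk, rfl⟩ := (PySem.List.mem_enumerate_iff _ _ _).mp hjc
    calc _ ≤ (PySem.List.enumerate (cols[k]) 0).length := List.length_filterMap_le _ _
      _ = (cols[k]).length := PySem.List.length_enumerate _ _
      _ ≤ m.toNat := hC.2 _ (List.getElem_mem hk)

-- ===== the loop, round by round =====

theorem loop_eq (m n : Int) (hm0 : 0 ≤ m) (fuel : Nat) :
    ∀ (answer : Int) (g : PvGrid) (cols : List (List Char)),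
      WinEq m n g cols → ColsOK m n cols →
      pvLoopA m n fuel answer g = pvLoopB n fuel answer cols := by
  induction fuel with
  | zero => intro answer g cols _ _; rfl
  | succ fuel ih =>
    intro answer g cols hW hC
    simp only [pvLoopA, pvLoopB]
    rw [pvCheckA_eq]
    have hlen := len_det_eq hW hC
    by_cases hnil : pvHitB n cols = []
    · have h0 : (specDetect m n g).length = 0 := by rw [hlen, hnil]; rfl
      rw [if_pos (by simp [h0]), if_pos hnil]
    · have hne : (specDetect m n g).length ≠ 0 := by
        rw [hlen]
        simpa [List.length_eq_zero_iff] using hnil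
      rw [if_neg (by simpa using hne), if_neg hnil]
      have hset : PySem.Set.len (pvHitB n cols) = ((specDetect m n g).length : Int) := by
        simp [PySem.Set.len, hlen]
      rw [hset, pvMoveA_eq]
      exact ih _ _ _ (winEq_next hW hC hm0) (colsOK_next hC _)

-- ===== degenerate boards (m ≤ 1 or n ≤ 1): both rounds detect nothing =====

theorem pvPairs_degenerate {m n : Int} (h : m ≤ 1 ∨ n ≤ 1) : pvPairs m n = [] := by
  unfold pvPairs
  rcases h with h | h
  · rw [PySem.List.pyRange_one_eq_nil (a := 0) (b := m-1) (by omega)]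
    rfl
  · rw [PySem.List.pyRange_one_eq_nil (a := 0) (b := n-1) (by omega)]
    simp

theorem colsInit_col_len (m n : Int) (board : List String) :
    ∀ col ∈ pvColsInit m n board, col.length = m.toNat := by
  intro col hcol
  unfold pvColsInit at hcol
  obtain ⟨j, hj, rfl⟩ := List.mem_map.mp hcol
  rw [List.length_map, PySem.List.length_pyRange_neg_one]
  omega

theorem winEq_init {m n : Int} {board : List String} (hm : 2 ≤ m) (hn : 2 ≤ n)
    (hb : m ≤ (board.length : Int))
    (hrow : ∀ s ∈ board.take m.toNat, n ≤ (s.toList.length : Int)) :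
    WinEq m n (board.map (fun s => s.toList.map some)) (pvColsInit m n board) := by
  intro i j hi0 him hj0 hjn
  have hib : i.toNat < board.length := by omega
  have hmem : board[i.toNat] ∈ board.take m.toNat := by
    have h1 : i.toNat < (board.take m.toNat).length := by
      rw [List.length_take]; omega
    have h2 := List.getElem_mem h1
    simpa [List.getElem_take] using h2
  have hrowlen : n ≤ ((board[i.toNat]).toList.length : Int) := hrow _ hmem
  have hjlen : j.toNat < (board[i.toNat]).toList.length := by omega
  -- left side: the raw grid cell
  rw [pvCell_nonneg _ hi0 hj0]
  unfold cellN
  have hrow_eq : (board.map (fun s => s.toList.map some)).getD i.toNat []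
      = (board[i.toNat]'hib).toList.map some := by
    rw [List.getD_eq_getElem _ _ (by simpa using hib), List.getElem_map]
  rw [hrow_eq, List.getD_eq_getElem _ _ (by simpa using hjlen), List.getElem_map]
  -- right side: the initial column stacks
  have hcolAt : pvColAt (pvColsInit m n board) j
      = (PySem.List.pyRange (m-1) (-1) (-1)).map (fun i' =>
          PySem.List.pyGetD (PySem.List.pyGetD board i' "").toList j ' ') := by
    unfold pvColAt pvColsInit
    rw [PySem.List.pyGetD_of_nonneg _ _ hj0,
        List.getD_eq_getElem _ _ (by simp [PySem.List.length_pyRange_one]; omega),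
        List.getElem_map, PySem.List.getElem_pyRange_one]
    have : (0:Int) + (j.toNat : Int) = j := by omega
    rw [this]
  unfold repCell pvLenCol
  rw [hcolAt]
  have hlenc : ((PySem.List.pyRange (m-1) (-1) (-1)).map (fun i' =>
      PySem.List.pyGetD (PySem.List.pyGetD board i' "").toList j ' ')).length = m.toNat := by
    rw [List.length_map, PySem.List.length_pyRange_neg_one]
    omega
  rw [if_pos (by rw [hlenc]; omega)]
  have ht : (m-1-i).toNat < m.toNat := by omega
  rw [List.getD_eq_getElem _ _ (by rw [hlenc]; exact ht), List.getElem_map]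
  have hidx : (PySem.List.pyRange (m-1) (-1) (-1))[(m-1-i).toNat]'(by
      rw [PySem.List.length_pyRange_neg_one]; omega) = i := by
    simp only [PySem.List.pyRange_neg_one, List.getElem_map, List.getElem_range]
    omega
  rw [hidx, PySem.List.pyGetD_of_nonneg _ _ hi0, List.getD_eq_getElem _ _ hib,
      PySem.List.pyGetD_of_nonneg _ _ hj0, List.getD_eq_getElem _ _ hjlen]

-- ===== VERDICT (by name: the statement is the Claim_ definition above) =====
theorem solution_spec : Claim_equal_solution := by
  intro m n board _ hpre
  unfold Spec_solution solution solution_alt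
  by_cases hmn : 2 ≤ m ∧ 2 ≤ n
  · rw [if_neg (by omega)]
    obtain ⟨hb, hrow⟩ := hpre hmn.1 hmn.2
    exact loop_eq m n (by omega) _ 0 _ _ (winEq_init hmn.1 hmn.2 hb hrow)
      ⟨by simp [pvColsInit, PySem.List.length_pyRange_one],
       fun col hcol => le_of_eq (colsInit_col_len m n board col hcol)⟩
  · have hdeg : m ≤ 1 ∨ n ≤ 1 := by omega
    have hdet : specDetect m n (board.map (fun s => s.toList.map some)) = [] := by
      unfold specDetect
      rw [pvPairs_degenerate hdeg]
      rfl
    rw [if_pos (by omega)]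
    simp only [pvLoopA, pvCheckA_eq, hdet]
    simp
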